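-- pv_equiv track=rewrite | github.com/suvigya-shankhdhar/project-5th-sem | key_scrambling.py | binary_transformation
-- ===== SOURCE A (Python) =====
-- def binary_transformation(large_key_string: str) -> list:
--     segments_list = []
--     binary_string = ""
--     for i in large_key_string:
--       b_i = format(ord(i), '08b')
--       binary_string += b_i
--
--     for i in range(0, len(binary_string), 8):
--       segment = binary_string[i:i+8]
--       segments_list.append(segment)
--       reversed_segment = segment[::-1]
--       segments_list.append(reversed_segment)
--       mutated_segment = segment[4:8:1] + segment[0:4:1]
--       segments_list.append(mutated_segment)
--     return segments_list
-- ===== SOURCE B (Python) =====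
-- def binary_transformation(large_key_string: str) -> list:
--     def variants(c):
--         seg = format(ord(c), '08b')
--         return [seg, seg[::-1], seg[4:] + seg[:4]]
--     return [v for c in large_key_string for v in variants(c)]
-- ===== Notes on version B (the rewrite author's own statement) =====
-- stated objective: simpler
-- what changed: B makes a single pass over the characters, emitting the three 8-bit variants per character directly, instead of first concatenating all bits into one string and then re-scanning/re-chunking it in a second loop.
import Mathlib
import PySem

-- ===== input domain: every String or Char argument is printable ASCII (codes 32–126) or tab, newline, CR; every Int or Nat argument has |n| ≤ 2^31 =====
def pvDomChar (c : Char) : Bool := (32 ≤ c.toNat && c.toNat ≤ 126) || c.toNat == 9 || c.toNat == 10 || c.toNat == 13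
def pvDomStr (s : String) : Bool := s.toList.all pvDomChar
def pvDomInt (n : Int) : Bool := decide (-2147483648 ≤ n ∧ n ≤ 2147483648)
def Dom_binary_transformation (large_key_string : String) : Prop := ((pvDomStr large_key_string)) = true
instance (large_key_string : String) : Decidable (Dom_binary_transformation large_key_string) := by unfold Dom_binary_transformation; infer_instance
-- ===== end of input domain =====

-- B replaces A's build-then-rechunk two-loop scheme by a single per-character pass; objective: simpler.

-- ===== PORT A =====
-- format(ord(c), '08b') : hand-ported bit expansion; exact for code points < 256 (Dom admits only codes ≤ 126)
def pvBits8 (c : Char) : List Char :=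
  (List.range 8).map (fun k => if c.toNat / 2 ^ (7 - k) % 2 = 1 then '1' else '0')

def binary_transformation (large_key_string : String) : List String :=
  let binary_string : List Char :=
    large_key_string.toList.foldl (fun acc c => acc ++ pvBits8 c) []
  (PySem.List.pyRange 0 (binary_string.length : Int) 8).foldl
    (fun acc i =>
      let segment := PySem.List.slice binary_string (some i) (some (i + 8))
      let reversed_segment := (PySem.List.slice? segment none none (-1)).getD []
      let mutated_segment :=
        PySem.List.slice segment (some 4) (some 8) ++ PySem.List.slice segment (some 0) (some 4)
      acc ++ [String.ofList segment, String.ofList reversed_segment, String.ofList mutated_segment])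
    []

-- ===== PORT B =====
def binary_transformation_alt (large_key_string : String) : List String :=
  large_key_string.toList.flatMap (fun c =>
    let seg := pvBits8 c
    [String.ofList seg, String.ofList seg.reverse, String.ofList (seg.drop 4 ++ seg.take 4)])

-- ===== PRECONDITION & SPEC =====
def Spec_binary_transformation (large_key_string : String) (out : List String) : Prop := out = binary_transformation_alt large_key_string
instance (large_key_string : String) (out : List String) : Decidable (Spec_binary_transformation large_key_string out) := by unfold Spec_binary_transformation; infer_instance

-- ===== CLAIM (what is proved, stated in full; the proofs are below) =====
def Claim_equal_binary_transformation : Prop := ∀ (large_key_string : String), Dom_binary_transformation large_key_string → Spec_binary_transformation large_key_string (binary_transformation large_key_string)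

-- ===== LEMMAS AND PROOFS =====

theorem pvBits8_length (c : Char) : (pvBits8 c).length = 8 := by
  simp [pvBits8]

theorem pvFlat_length (cl : List Char) : (cl.flatMap pvBits8).length = 8 * cl.length := by
  induction cl with
  | nil => simp
  | cons c cl ih => simp [ih, pvBits8_length]; ring

theorem pvRange8 (n : ℕ) :
    PySem.List.pyRange 0 ((8 * n : ℕ) : Int) 8
      = (List.range n).map (fun k : ℕ => ((8 * k : ℕ) : Int)) := by
  rw [PySem.List.pyRange_of_pos _ _ (by norm_num)]
  have hc : (if (0 : Int) < ((8 * n : ℕ) : Int)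
      then ((((8 * n : ℕ) : Int) - 0 + 8 - 1) / 8).toNat else 0) = n := by
    split_ifs with h
    · push_cast at h ⊢; omega
    · push_cast at h; omega
  rw [hc]
  apply List.map_congr_left
  intro k _
  push_cast
  ring

theorem pvFlatMap_congr {α β : Type} (l : List α) (f g : α → List β)
    (h : ∀ x ∈ l, f x = g x) : l.flatMap f = l.flatMap g := by
  induction l with
  | nil => rfl
  | cons x l ih => simp [List.flatMap_cons, h x (by simp), ih (fun y hy => h y (by simp [hy]))]

theorem pvBlocks (g : List Char → List String) (cl : List Char) :
    (List.range cl.length).flatMap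
        (fun k => g (((cl.flatMap pvBits8).drop (8 * k)).take 8))
      = cl.flatMap (fun c => g (pvBits8 c)) := by
  induction cl with
  | nil => simp
  | cons c cl ih =>
    simp only [List.length_cons, List.range_succ_eq_map, List.flatMap_cons, List.flatMap_map,
      Nat.mul_zero, List.drop_zero]
    have h0 : (pvBits8 c ++ cl.flatMap pvBits8).take 8 = pvBits8 c := by
      rw [← pvBits8_length c, List.take_left]
    have hsh : ∀ k : ℕ, ((pvBits8 c ++ cl.flatMap pvBits8).drop (8 * (k + 1))).take 8
        = ((cl.flatMap pvBits8).drop (8 * k)).take 8 := by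
      intro k
      have h1 : 8 * (k + 1) = (pvBits8 c).length + 8 * k := by rw [pvBits8_length]; ring
      rw [h1, List.drop_append]
      have e1 : List.drop ((pvBits8 c).length + 8 * k) (pvBits8 c) = [] :=
        List.drop_eq_nil_of_le (by omega)
      have e2 : (pvBits8 c).length + 8 * k - (pvBits8 c).length = 8 * k := by omega
      rw [e1, e2, List.nil_append]
    simp only [Nat.succ_eq_add_one, hsh, h0]
    rw [ih]

theorem pvSeg48 (b : List Char) : PySem.List.slice b (some 4) (some 8) = (b.drop 4).take 4 := by
  rw [PySem.List.slice_toNat] <;> simp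

theorem pvSeg04 (b : List Char) : PySem.List.slice b (some 0) (some 4) = b.take 4 := by
  rw [PySem.List.slice_toNat] <;> simp

theorem pvMain (s : String) : binary_transformation s = binary_transformation_alt s := by
  unfold binary_transformation binary_transformation_alt
  simp only [PySem.List.foldl_append_eq_flatMap, List.nil_append]
  rw [pvFlat_length, pvRange8, List.flatMap_map]
  have hslice : ∀ k : ℕ,
      PySem.List.slice (s.toList.flatMap pvBits8) (some ((8 * k : ℕ) : Int))
          (some (((8 * k : ℕ) : Int) + 8))
        = ((s.toList.flatMap pvBits8).drop (8 * k)).take 8 := by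
    intro k
    have e1 : ((((8 * k : ℕ) : Int)) + 8).toNat - (((8 * k : ℕ) : Int)).toNat = 8 := by omega
    have e2 : (((8 * k : ℕ) : Int)).toNat = 8 * k := by omega
    rw [PySem.List.slice_toNat]
    case ha => omega
    case hb => omega
    rw [e1, e2]
  refine Eq.trans (pvFlatMap_congr (List.range s.toList.length) _
      (fun k => (fun b : List Char =>
        [String.ofList b, String.ofList b.reverse, String.ofList ((b.drop 4).take 4 ++ b.take 4)])
        (((s.toList.flatMap pvBits8).drop (8 * k)).take 8)) ?_) ?_
  · intro k _
    simp only [hslice k, PySem.List.slice?_none_none_neg_one,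
      Option.getD_some, pvSeg48, pvSeg04]
  · refine (pvBlocks (fun b => [String.ofList b, String.ofList b.reverse,
        String.ofList ((b.drop 4).take 4 ++ b.take 4)]) s.toList).trans
      (pvFlatMap_congr _ _ _ (fun c _ => ?_))
    have h4 : ((pvBits8 c).drop 4).take 4 = (pvBits8 c).drop 4 :=
      List.take_of_length_le (by simp [pvBits8_length])
    simp [h4]

-- ===== VERDICT (by name: the statement is the Claim_ definition above) =====
theorem binary_transformation_spec : Claim_equal_binary_transformation := by
  intro s _
  unfold Spec_binary_transformation
  exact pvMain s
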